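-- pv_equiv track=rewrite | github.com/ifyjakande/doc-price-alert | doc_price_alert.py | get_latest_row_with_date
-- ===== SOURCE A (Python) =====
-- def get_latest_row_with_date(data: list) -> tuple:
--     """Find the latest row that has a date (may be incomplete). Returns (row_index, row_data)."""
--     if len(data) <= 1:  # Only header or empty
--         return None, None
--
--     # Start from the end and find the last row with a date
--     for i in range(len(data) - 1, 0, -1):  # Skip header row (index 0)
--         row = data[i]
--         if row and len(row) > 0 and row[0].strip():
--             return i, row
--
--     return None, None
-- ===== SOURCE B (Python) =====
-- def get_latest_row_with_date(data: list) -> tuple: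
--     """Find the latest row that has a date (may be incomplete). Returns (row_index, row_data)."""
--     last_i, last_row = None, None
--     for i in range(1, len(data)):  # skip header row; empty range when len(data) <= 1
--         row = data[i]
--         if row and len(row) > 0 and row[0].strip():
--             last_i, last_row = i, row
--     return last_i, last_row
-- ===== Notes on version B (the rewrite author's own statement) =====
-- stated objective: alternative
-- what changed: Backward early-return scan replaced by a forward single pass that keeps the last matching (index, row) in an accumulator; the len<=1 guard disappears because the forward range is then empty.
import Mathlib
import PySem

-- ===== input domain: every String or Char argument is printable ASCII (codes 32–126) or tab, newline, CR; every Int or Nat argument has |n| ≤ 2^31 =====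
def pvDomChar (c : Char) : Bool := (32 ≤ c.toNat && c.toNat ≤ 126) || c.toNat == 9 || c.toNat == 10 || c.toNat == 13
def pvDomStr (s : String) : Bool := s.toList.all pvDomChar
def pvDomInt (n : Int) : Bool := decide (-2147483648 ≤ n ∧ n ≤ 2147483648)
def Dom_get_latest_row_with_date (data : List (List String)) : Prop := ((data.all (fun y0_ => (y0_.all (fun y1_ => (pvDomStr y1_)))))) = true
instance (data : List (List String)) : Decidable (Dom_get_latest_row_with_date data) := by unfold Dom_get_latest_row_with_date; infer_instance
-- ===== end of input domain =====

-- B replaces A's backward early-return scan by a forward single pass keeping the last match; return values only, no mutation.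

-- ===== PORT A =====
-- `row and len(row) > 0 and row[0].strip()`: nonempty row whose first cell strips to nonempty
def pvCond (row : List String) : Bool :=
  match row with
  | [] => false
  | s :: _ => !(PySem.Chars.strip s.toList).isEmpty

-- the backward-range loop of A; data[i] via pyGetD is exact here: every i produced by
-- range(len(data)-1, 0, -1) is in range, so Python never raises on the access
def pvLoopA (data : List (List String)) : List Int → Option Int × Option (List String)
  | [] => (none, none)
  | i :: rest =>
    let row := PySem.List.pyGetD data i []
    if pvCond row then (some i, some row) else pvLoopA data rest

def get_latest_row_with_date (data : List (List String)) : Option Int × Option (List String) :=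
  if (data.length : Int) ≤ 1 then (none, none)
  else pvLoopA data (PySem.List.pyRange ((data.length : Int) - 1) 0 (-1))

-- ===== PORT B =====
def pvStep (data : List (List String)) (acc : Option Int × Option (List String)) (i : Int) :
    Option Int × Option (List String) :=
  let row := PySem.List.pyGetD data i []
  if pvCond row then (some i, some row) else acc

def get_latest_row_with_date_alt (data : List (List String)) : Option Int × Option (List String) :=
  (PySem.List.pyRange 1 (data.length : Int) 1).foldl (pvStep data) (none, none)

-- ===== PRECONDITION & SPEC =====
def Spec_get_latest_row_with_date (data : List (List String)) (out : Option Int × Option (List String)) : Prop := out = get_latest_row_with_date_alt data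
instance (data : List (List String)) (out : Option Int × Option (List String)) : Decidable (Spec_get_latest_row_with_date data out) := by unfold Spec_get_latest_row_with_date; infer_instance

-- ===== CLAIM (what is proved, stated in full; the proofs are below) =====
def Claim_equal_get_latest_row_with_date : Prop := ∀ (data : List (List String)), Dom_get_latest_row_with_date data → Spec_get_latest_row_with_date data (get_latest_row_with_date data)

-- ===== LEMMAS AND PROOFS =====

theorem pvLoopA_append (data : List (List String)) (u v : List Int) :
    pvLoopA data (u ++ v) =
      match pvLoopA data u with
      | (some i, r) => (some i, r)
      | (none, _) => pvLoopA data v := by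
  induction u with
  | nil => simp [pvLoopA]
  | cons i rest ih =>
    simp only [List.cons_append, pvLoopA]
    split
    · rfl
    · exact ih

theorem pvLoopA_none (data : List (List String)) (l : List Int) :
    (pvLoopA data l).1 = none → pvLoopA data l = (none, none) := by
  induction l with
  | nil => intro _; rfl
  | cons i rest ih =>
    simp only [pvLoopA]
    split
    · intro h; simp at h
    · exact ih

theorem foldl_step_eq (data : List (List String)) (l : List Int)
    (acc : Option Int × Option (List String)) :
    l.foldl (pvStep data) acc =
      match pvLoopA data l.reverse with
      | (some i, r) => (some i, r)
      | (none, _) => acc := by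
  induction l generalizing acc with
  | nil => simp [pvLoopA]
  | cons i rest ih =>
    simp only [List.foldl_cons, List.reverse_cons, pvLoopA_append]
    rw [ih]
    rcases h : pvLoopA data rest.reverse with ⟨fst, snd⟩
    cases fst with
    | some j => simp
    | none =>
      simp only
      simp [pvLoopA, pvStep]
      split <;> rfl

-- ===== VERDICT (by name: the statement is the Claim_ definition above) =====
theorem get_latest_row_with_date_spec : Claim_equal_get_latest_row_with_date := by
  intro data _
  unfold Spec_get_latest_row_with_date get_latest_row_with_date get_latest_row_with_date_alt
  by_cases h : (data.length : Int) ≤ 1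
  · rw [if_pos h, PySem.List.pyRange_one_eq_nil h]
    rfl
  · rw [if_neg h]
    rw [foldl_step_eq]
    have hr : PySem.List.pyRange ((data.length : Int) - 1) 0 (-1)
        = (PySem.List.pyRange 1 (data.length : Int) 1).reverse := by
      rw [PySem.List.pyRange_neg_one_eq_reverse]
      norm_num
    rw [← hr]
    rcases hA : pvLoopA data (PySem.List.pyRange ((data.length : Int) - 1) 0 (-1)) with ⟨fst, snd⟩
    cases fst with
    | some j => rfl
    | none =>
      have := pvLoopA_none data (PySem.List.pyRange ((data.length : Int) - 1) 0 (-1)) (by rw [hA])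
      rw [hA] at this
      simp at this; simp [this]
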